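-- pv_equiv track=rewrite | github.com/metonline/mgbric | calculate_dd_for_hands.py | card_to_dds
-- ===== SOURCE A (Python) =====
-- def card_to_dds(card_str):
--     """Convert card string (e.g., 'AT73') to DDS format (list of integers)"""
--     if not card_str:
--         return []
--
--     rank_map = {'2': 0, '3': 1, '4': 2, '5': 3, '6': 4, '7': 5, '8': 6,
--                 '9': 7, 'T': 8, 'J': 9, 'Q': 10, 'K': 11, 'A': 12}
--
--     result = []
--     for card in card_str:
--         if card in rank_map:
--             result.append(rank_map[card])
--     return sorted(result, reverse=True)
-- ===== SOURCE B (Python) =====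
-- def card_to_dds(card_str):
--     """Convert card string (e.g., 'AT73') to DDS format (list of integers)"""
--     result = []
--     value = 12
--     for rank in "AKQJT98765432":
--         result += [value] * card_str.count(rank)
--         value -= 1
--     return result
-- ===== Notes on version B (the rewrite author's own statement) =====
-- stated objective: faster
-- what changed: B replaces A's collect-then-sort with a single fixed sweep over the 13 ranks in descending order, emitting each rank's value card_str.count(rank) times, so no sort and no per-character Python loop is performed.
import Mathlib
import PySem

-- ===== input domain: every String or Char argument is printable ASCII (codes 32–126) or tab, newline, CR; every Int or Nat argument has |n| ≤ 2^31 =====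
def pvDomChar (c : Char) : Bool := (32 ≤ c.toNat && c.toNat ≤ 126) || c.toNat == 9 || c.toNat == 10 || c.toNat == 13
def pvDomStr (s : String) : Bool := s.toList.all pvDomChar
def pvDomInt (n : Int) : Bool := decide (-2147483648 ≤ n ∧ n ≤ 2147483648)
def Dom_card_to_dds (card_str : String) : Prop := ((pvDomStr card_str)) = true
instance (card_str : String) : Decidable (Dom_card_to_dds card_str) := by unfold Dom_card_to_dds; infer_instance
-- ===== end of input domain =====

-- B replaces A's collect-then-sort with a fixed sweep over the 13 ranks in descending order,
-- emitting each rank's value count-many times (no sort); both return the same list on every input.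

-- ===== PORT A =====
-- the dict literal rank_map of A, as an association list in insertion order
def pvRankMap : PySem.Dict Char Int :=
  PySem.Dict.mk [('2', 0), ('3', 1), ('4', 2), ('5', 3), ('6', 4), ('7', 5), ('8', 6),
                 ('9', 7), ('T', 8), ('J', 9), ('Q', 10), ('K', 11), ('A', 12)]

def card_to_dds (card_str : String) : List Int :=
  if card_str = "" then []
  else
    let result := card_str.toList.foldl
      (fun acc card => if pvRankMap.contains card then acc ++ [pvRankMap.getD card 0] else acc) []
    PySem.List.sorted result (fun x => x) true

-- ===== PORT B =====
def card_to_dds_alt (card_str : String) : List Int :=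
  (("AKQJT98765432".toList).foldl
    (fun st rank => (st.1 ++ List.replicate (PySem.Str.count card_str (String.ofList [rank])) st.2,
                     st.2 - 1))
    (([] : List Int), (12 : Int))).1

-- ===== PRECONDITION & SPEC =====
def Spec_card_to_dds (card_str : String) (out : List Int) : Prop := out = card_to_dds_alt card_str
instance (card_str : String) (out : List Int) : Decidable (Spec_card_to_dds card_str out) := by unfold Spec_card_to_dds; infer_instance

-- ===== CLAIM (what is proved, stated in full; the proofs are below) =====
def Claim_equal_card_to_dds : Prop := ∀ (card_str : String), Dom_card_to_dds card_str → Spec_card_to_dds card_str (card_to_dds card_str)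

-- ===== LEMMAS AND PROOFS =====

-- the 13 ranks in descending order with their values (proof-only helper)
def pvPairs : List (Char × Int) :=
  [('A', 12), ('K', 11), ('Q', 10), ('J', 9), ('T', 8), ('9', 7), ('8', 6),
   ('7', 5), ('6', 4), ('5', 3), ('4', 2), ('3', 1), ('2', 0)]

-- descending blocks of repeated values, one block per rank
def pvBlocks (chars : List Char) : List Int :=
  (pvPairs.map (fun pr => List.replicate (chars.count pr.1) pr.2)).flatten

-- A's loop result is the mapped filter of the input characters
lemma A_unfold (s : String) :
    card_to_dds s =
      PySem.List.sorted ((s.toList.filter (fun c => pvRankMap.contains c)).map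
        (fun c => pvRankMap.getD c 0)) (fun x => x) true := by
  unfold card_to_dds
  by_cases h : s = ""
  · subst h; rfl
  · rw [if_neg h, PySem.List.foldl_append_if]
    simp

-- counting a single-character substring is counting that character
lemma count_go_singleton (c : Char) : ∀ (l : List Char) (fuel acc : Nat), l.length ≤ fuel →
    PySem.Chars.count.go [c] fuel l acc = acc + l.count c := by
  intro l
  induction l with
  | nil => intro fuel acc _; cases fuel <;> simp [PySem.Chars.count.go]
  | cons h t ih =>
    intro fuel acc hf
    cases fuel with
    | zero => simp at hf
    | succ fuel =>
      simp only [List.length_cons, Nat.add_one_le_add_one_iff] at hf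
      by_cases hc : c = h
      · subst hc
        have hpre : List.isPrefixOf [c] (c :: t) = true := by simp [List.isPrefixOf]
        simp only [PySem.Chars.count.go, hpre, if_true, List.length_cons]
        rw [show List.drop ([].length + 1) (c :: t) = t from rfl, ih fuel (acc + 1) hf,
            List.count_cons]
        simp
        omega
      · have hpre : List.isPrefixOf [c] (h :: t) = false := by simp [List.isPrefixOf, hc]
        simp only [PySem.Chars.count.go, hpre]
        rw [ih fuel acc hf, List.count_cons]
        simp [Ne.symm hc]

lemma str_count_singleton (s : String) (c : Char) :
    PySem.Str.count s (String.ofList [c]) = s.toList.count c := by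
  rw [PySem.Str.count_eq]
  rw [String.toList_ofList]
  unfold PySem.Chars.count
  simp only [List.isEmpty_cons, if_false, Bool.false_eq_true]
  rw [count_go_singleton c s.toList s.toList.length 0 le_rfl, Nat.zero_add]

-- B's result is pvBlocks of the input characters
lemma B_unfold (s : String) : card_to_dds_alt s = pvBlocks s.toList := by
  have hc : ∀ (r : Char), PySem.Str.count s (String.ofList [r]) = s.toList.count r :=
    fun r => str_count_singleton s r
  unfold card_to_dds_alt pvBlocks pvPairs
  rw [show "AKQJT98765432".toList
        = ['A','K','Q','J','T','9','8','7','6','5','4','3','2'] from rfl]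
  simp only [List.foldl_cons, List.foldl_nil, hc]
  norm_num

-- looking up a character among the descending pairs agrees with A's dict
lemma find_pairs (c : Char) :
    pvPairs.find? (fun pr => pr.1 == c) =
      (if pvRankMap.contains c = true then some (c, pvRankMap.getD c 0) else none) := by
  by_cases h2 : c = '2'; · subst h2; decide
  by_cases h3 : c = '3'; · subst h3; decide
  by_cases h4 : c = '4'; · subst h4; decide
  by_cases h5 : c = '5'; · subst h5; decide
  by_cases h6 : c = '6'; · subst h6; decide
  by_cases h7 : c = '7'; · subst h7; decide
  by_cases h8 : c = '8'; · subst h8; decide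
  by_cases h9 : c = '9'; · subst h9; decide
  by_cases hT : c = 'T'; · subst hT; decide
  by_cases hJ : c = 'J'; · subst hJ; decide
  by_cases hQ : c = 'Q'; · subst hQ; decide
  by_cases hK : c = 'K'; · subst hK; decide
  by_cases hA : c = 'A'; · subst hA; decide
  have e2 : ('2' == c) = false := by simp [Ne.symm h2]
  have e3 : ('3' == c) = false := by simp [Ne.symm h3]
  have e4 : ('4' == c) = false := by simp [Ne.symm h4]
  have e5 : ('5' == c) = false := by simp [Ne.symm h5]
  have e6 : ('6' == c) = false := by simp [Ne.symm h6]
  have e7 : ('7' == c) = false := by simp [Ne.symm h7]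
  have e8 : ('8' == c) = false := by simp [Ne.symm h8]
  have e9 : ('9' == c) = false := by simp [Ne.symm h9]
  have eT : ('T' == c) = false := by simp [Ne.symm hT]
  have eJ : ('J' == c) = false := by simp [Ne.symm hJ]
  have eQ : ('Q' == c) = false := by simp [Ne.symm hQ]
  have eK : ('K' == c) = false := by simp [Ne.symm hK]
  have eA : ('A' == c) = false := by simp [Ne.symm hA]
  simp [pvPairs, pvRankMap, PySem.Dict.contains, List.find?,
        e2, e3, e4, e5, e6, e7, e8, e9, eT, eJ, eQ, eK, eA]

-- bumping the count of one character inserts one copy of its value into the blocks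
lemma blocks_insert (pairs : List (Char × Int)) (c : Char) (cnt : Char → Nat)
    (hnd : (pairs.map Prod.fst).Nodup) :
    ((pairs.map (fun pr => List.replicate (cnt pr.1 + (if c = pr.1 then 1 else 0)) pr.2)).flatten).Perm
      (match pairs.find? (fun pr => pr.1 == c) with
       | some pr => pr.2 :: (pairs.map (fun pr => List.replicate (cnt pr.1) pr.2)).flatten
       | none => (pairs.map (fun pr => List.replicate (cnt pr.1) pr.2)).flatten) := by
  induction pairs with
  | nil => simp
  | cons pr rest ih =>
    simp only [List.map_cons, List.nodup_cons, List.mem_map] at hnd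
    by_cases h : pr.1 = c
    · subst h
      have hrest : rest.map (fun q => List.replicate (cnt q.1 + (if pr.1 = q.1 then 1 else 0)) q.2)
          = rest.map (fun q => List.replicate (cnt q.1) q.2) := by
        apply List.map_congr_left
        intro q hq
        have hne : ¬ pr.1 = q.1 := by
          intro hqc
          exact hnd.1 ⟨q, hq, hqc.symm⟩
        simp [hne]
      simp only [List.map_cons, List.flatten_cons, List.find?_cons, beq_self_eq_true, hrest,
                 if_true]
      rw [List.replicate_succ]
      exact List.Perm.refl _
    · have hb : (pr.1 == c) = false := by simp [h]
      have hcne : ¬ c = pr.1 := fun hx => h hx.symm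
      have ih' := ih hnd.2
      simp only [List.map_cons, List.flatten_cons, List.find?_cons, hb, if_neg hcne, Nat.add_zero]
      cases hf : rest.find? (fun q => q.1 == c) with
      | none =>
        rw [hf] at ih'
        exact ih'.append_left (List.replicate (cnt pr.1) pr.2)
      | some q =>
        rw [hf] at ih'
        exact (ih'.append_left (List.replicate (cnt pr.1) pr.2)).trans List.perm_middle

-- the blocks are a permutation of A's mapped filter
lemma blocks_perm (chars : List Char) :
    (pvBlocks chars).Perm
      ((chars.filter (fun c => pvRankMap.contains c)).map (fun c => pvRankMap.getD c 0)) := by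
  induction chars with
  | nil => simp [pvBlocks, pvPairs]
  | cons c cs ih =>
    have hnd : (pvPairs.map Prod.fst).Nodup := by decide
    have hstep := blocks_insert pvPairs c (fun r => cs.count r) hnd
    rw [find_pairs c] at hstep
    have hcnt : (pvPairs.map (fun pr => List.replicate ((c :: cs).count pr.1) pr.2))
        = pvPairs.map (fun pr => List.replicate (cs.count pr.1 + (if c = pr.1 then 1 else 0)) pr.2) := by
      apply List.map_congr_left
      intro pr _
      rw [List.count_cons]
      simp
    by_cases h : pvRankMap.contains c = true
    · rw [if_pos h] at hstep
      unfold pvBlocks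
      rw [hcnt]
      simp only [List.filter_cons, h]
      exact hstep.trans (ih.cons _)
    · rw [if_neg h] at hstep
      unfold pvBlocks
      rw [hcnt]
      have hb : pvRankMap.contains c = false := by simpa using h
      simp only [List.filter_cons, hb, Bool.false_eq_true, if_false]
      exact hstep.trans ih

-- blocks built from value-descending pairs are pairwise descending
lemma blocks_pairwise (pairs : List (Char × Int)) (cnt : Char → Nat)
    (hp : pairs.Pairwise (fun x y => y.2 ≤ x.2)) :
    ((pairs.map (fun pr => List.replicate (cnt pr.1) pr.2)).flatten).Pairwise (fun a b => b ≤ a) := by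
  induction pairs with
  | nil => simp
  | cons pr rest ih =>
    rw [List.pairwise_cons] at hp
    simp only [List.map_cons, List.flatten_cons]
    apply List.pairwise_append.mpr
    refine ⟨List.pairwise_replicate.mpr (Or.inr le_rfl), ih hp.2, ?_⟩
    intro a ha b hb
    rw [List.eq_of_mem_replicate ha]
    simp only [List.mem_flatten, List.mem_map] at hb
    obtain ⟨l, ⟨q, hq, rfl⟩, hbl⟩ := hb
    rw [List.eq_of_mem_replicate hbl]
    exact hp.1 q hq

-- ===== VERDICT (by name: the statement is the Claim_ definition above) =====
theorem card_to_dds_spec : Claim_equal_card_to_dds := by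
  intro s _
  unfold Spec_card_to_dds
  rw [A_unfold, B_unfold]
  have hpw : (pvBlocks s.toList).Pairwise (fun a b : Int => b ≤ a) := by
    unfold pvBlocks
    exact blocks_pairwise pvPairs (fun r => s.toList.count r) (by decide)
  exact List.Perm.eq_of_pairwise (le := fun a b : Int => b ≤ a)
    (fun a b _ _ hab hba => le_antisymm hba hab)
    (PySem.List.sorted_pairwise_rev _ _) hpw
    ((PySem.List.sorted_perm _ _ _).trans (blocks_perm s.toList).symm)
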